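-- pv_equiv track=rewrite | github.com/Koozzi/Algorithms | BJ/implementation/S2_5430_20201224.py | solve
-- ===== SOURCE A (Python) =====
-- def solve(funcs, num_list):
--     left = True
--
--     if len(num_list) < funcs.count('D'):
--         return 'error\n'
--
--     for func in funcs:
--         if func == 'R':
--             left = not left
--
--         elif func == 'D':
--             if left:
--                 num_list.pop(0)
--             else:
--                 num_list.pop()
--
--     if len(num_list) > 0:
--         if left:
--             return '['+ ','.join(num_list) +']\n'
--         else:
--             return '['+ ','.join(reversed(num_list)) +']\n'
--
--     else:
--         return '[]\n'
-- ===== SOURCE B (Python) =====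
-- def solve(funcs, num_list):
--     # Two pointers + direction flag; one final slice/reverse; no per-'D' pops.
--     # Return-value equivalent to A; unlike A it never mutates num_list.
--     lo, hi, left = 0, len(num_list), True
--     for c in funcs:
--         if c == 'R':
--             left = not left
--         elif c == 'D':
--             if left:
--                 lo += 1
--             else:
--                 hi -= 1
--     if hi < lo:
--         return 'error\n'
--     body = num_list[lo:hi]
--     if not left:
--         body.reverse()
--     return '[' + ','.join(body) + ']\n'
-- ===== Notes on version B (the rewrite author's own statement) =====
-- stated objective: alternative
-- what changed: Replaces A's per-'D' in-place list mutation (pop(0)/pop()) with two index pointers moved in one pass over funcs, followed by a single slice and optional reverse; the error case falls out as the pointers crossing, and B never mutates num_list.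
import Mathlib
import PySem

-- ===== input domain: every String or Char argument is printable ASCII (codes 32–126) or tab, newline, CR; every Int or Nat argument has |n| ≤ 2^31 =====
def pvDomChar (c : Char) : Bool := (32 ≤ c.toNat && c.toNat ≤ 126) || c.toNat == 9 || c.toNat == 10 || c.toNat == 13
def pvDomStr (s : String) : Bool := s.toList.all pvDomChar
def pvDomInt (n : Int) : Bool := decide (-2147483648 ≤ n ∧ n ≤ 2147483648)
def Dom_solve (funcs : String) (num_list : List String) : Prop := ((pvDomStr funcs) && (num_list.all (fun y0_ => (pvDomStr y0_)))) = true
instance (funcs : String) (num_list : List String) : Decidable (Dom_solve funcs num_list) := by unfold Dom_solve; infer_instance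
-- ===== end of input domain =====

-- B replaces A's per-'D' in-place list mutation with two index pointers moved in one pass
-- and a single final slice/reverse; equivalence is about the RETURN value only: A pops
-- elements from its argument list in place, B never mutates it.


-- ===== PORT A =====
-- one iteration of A's for-loop: state = (left, num_list); pop(0)/pop() via PySem.List.pop?
-- (the .getD fallback is unreachable: the 'error' guard ensures every pop hits a nonempty list)
def solveStepA (st : Bool × List String) (c : Char) : Bool × List String :=
  if c = 'R' then (!st.1, st.2)
  else if c = 'D' then
    if st.1 then (st.1, ((PySem.List.pop? st.2 0).map Prod.snd).getD st.2)
    else (st.1, ((PySem.List.pop? st.2).map Prod.snd).getD st.2)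
  else st

def solve (funcs : String) (num_list : List String) : String :=
  if num_list.length < PySem.Str.count funcs "D" then "error\n"
  else
    let st := funcs.toList.foldl solveStepA (true, num_list)
    if st.2.length > 0 then
      if st.1 then PySem.Str.join "" ["[", PySem.Str.join "," st.2, "]\n"]
      else PySem.Str.join "" ["[", PySem.Str.join "," st.2.reverse, "]\n"]
    else "[]\n"

-- ===== PORT B =====
-- one iteration of B's loop: state = (left, lo, hi), indices into the untouched num_list
def solveStepB (st : Bool × Int × Int) (c : Char) : Bool × Int × Int :=
  if c = 'R' then (!st.1, st.2.1, st.2.2)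
  else if c = 'D' then
    if st.1 then (st.1, st.2.1 + 1, st.2.2)
    else (st.1, st.2.1, st.2.2 - 1)
  else st

def solve_alt (funcs : String) (num_list : List String) : String :=
  let st := funcs.toList.foldl solveStepB (true, 0, (num_list.length : Int))
  if st.2.2 < st.2.1 then "error\n"
  else
    let body := PySem.List.slice num_list (some st.2.1) (some st.2.2)
    let body := if st.1 then body else body.reverse
    PySem.Str.join "" ["[", PySem.Str.join "," body, "]\n"]

-- ===== PRECONDITION & SPEC =====
def Spec_solve (funcs : String) (num_list : List String) (out : String) : Prop := out = solve_alt funcs num_list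
instance (funcs : String) (num_list : List String) (out : String) : Decidable (Spec_solve funcs num_list out) := by unfold Spec_solve; infer_instance

-- ===== CLAIM (what is proved, stated in full; the proofs are below) =====
def Claim_equal_solve : Prop := ∀ (funcs : String) (num_list : List String), Dom_solve funcs num_list → Spec_solve funcs num_list (solve funcs num_list)

-- ===== LEMMAS AND PROOFS =====

-- (a, b) = how many front pops / back pops the op string performs, and the final direction
def popCounts : List Char → Bool → Nat × Nat
  | [], _ => (0, 0)
  | c :: cs, left =>
    if c = 'R' then popCounts cs (!left)
    else if c = 'D' then
      let p := popCounts cs left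
      if left then (p.1 + 1, p.2) else (p.1, p.2 + 1)
    else popCounts cs left

def finalLeft : List Char → Bool → Bool
  | [], left => left
  | c :: cs, left => if c = 'R' then finalLeft cs (!left) else finalLeft cs left

theorem popCounts_sum (cs : List Char) (left : Bool) :
    (popCounts cs left).1 + (popCounts cs left).2 = cs.count 'D' := by
  induction cs generalizing left with
  | nil => simp [popCounts]
  | cons c cs ih =>
    by_cases hR : c = 'R' <;> by_cases hD : c = 'D' <;>
      simp_all [popCounts] <;> cases hb : popCounts cs left <;>
      rcases left <;> simp_all <;> omega

theorem countGo_singleton (v : Char) (fuel : Nat) (l : List Char) (acc : Nat)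
    (h : l.length ≤ fuel) :
    PySem.Chars.count.go [v] fuel l acc = acc + l.count v := by
  induction fuel generalizing l acc with
  | zero =>
    have : l = [] := by cases l <;> simp_all
    subst this; simp [PySem.Chars.count.go]
  | succ n ih =>
    cases l with
    | nil => simp [PySem.Chars.count.go]
    | cons x xs =>
      simp only [PySem.Chars.count.go]
      by_cases hx : x = v
      · subst hx
        have hp : [x].isPrefixOf (x :: xs) = true := by
          simp [List.isPrefixOf]
        rw [hp]
        simp only [if_true, List.length_cons, List.length_nil, List.drop_zero, List.drop_succ_cons]
        rw [ih xs (acc + 1) (by simp at h; omega)]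
        simp
        omega
      · have hp : [v].isPrefixOf (x :: xs) = false := by
          simp [List.isPrefixOf]; exact fun h' => (hx h'.symm).elim
        rw [hp]
        simp only [Bool.false_eq_true, if_false]
        rw [ih xs acc (by simp at h; omega)]
        simp [hx]

theorem strCount_D (s : String) : PySem.Str.count s "D" = s.toList.count 'D' := by
  have h0 : PySem.Str.count s "D" = PySem.Chars.count s.toList ['D'] := rfl
  rw [h0, PySem.Chars.count]
  simp only [List.isEmpty_cons, Bool.false_eq_true, if_false]
  rw [countGo_singleton 'D' s.toList.length s.toList 0 le_rfl]
  simp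

theorem foldB_eq (cs : List Char) (left : Bool) (lo hi : Int) :
    cs.foldl solveStepB (left, lo, hi) =
      (finalLeft cs left, lo + ((popCounts cs left).1 : Int), hi - ((popCounts cs left).2 : Int)) := by
  induction cs generalizing left lo hi with
  | nil => simp [popCounts, finalLeft]
  | cons c cs ih =>
    by_cases hR : c = 'R' <;> by_cases hD : c = 'D' <;>
      simp_all [popCounts, finalLeft, solveStepB, List.foldl_cons] <;>
      cases hb : popCounts cs left <;> rcases left <;>
      simp_all <;> ring_nf

theorem foldA_eq (cs : List Char) (left : Bool) (xs : List String)
    (h : (popCounts cs left).1 + (popCounts cs left).2 ≤ xs.length) :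
    cs.foldl solveStepA (left, xs) =
      (finalLeft cs left,
        (xs.drop (popCounts cs left).1).take
          (xs.length - (popCounts cs left).1 - (popCounts cs left).2)) := by
  induction cs generalizing left xs with
  | nil => simp [popCounts, finalLeft]
  | cons c cs ih =>
    by_cases hR : c = 'R'
    · subst hR
      simp only [List.foldl_cons, solveStepA, if_true, popCounts, finalLeft]
      exact ih (!left) xs (by simpa [popCounts] using h)
    · by_cases hD : c = 'D'
      · subst hD
        have hR' : ('D' : Char) ≠ 'R' := by decide
        rcases left with _ | _
        · -- left = false : pop from the back
          have hcc : popCounts ('D' :: cs) false =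
              ((popCounts cs false).1, (popCounts cs false).2 + 1) := by
            simp [popCounts]
          rw [hcc] at h ⊢
          have hne : xs ≠ [] := by
            intro hx; subst hx; simp at h
          have hxs : xs = xs.dropLast ++ [xs.getLast hne] := by
            exact (List.dropLast_append_getLast hne).symm
          simp only [List.foldl_cons, solveStepA, Char.reduceEq, reduceIte, Bool.false_eq_true]
          have hpop : (((PySem.List.pop? xs).map Prod.snd).getD xs) = xs.dropLast := by
            conv_lhs => rw [hxs]
            rw [PySem.List.pop?_last]
            conv_rhs => rw [hxs]
            simp
          rw [hpop]
          have hlen : xs.dropLast.length = xs.length - 1 := by simp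
          rw [ih false xs.dropLast (by omega)]
          rw [Prod.mk.injEq]
          refine ⟨?_, ?_⟩
          · simp [finalLeft]
          · rw [List.dropLast_eq_take]
            rw [List.drop_take]
            rw [List.take_take]
            simp only [List.length_take]
            congr 1
            omega
        · -- left = true : pop from the front
          have hcc : popCounts ('D' :: cs) true =
              ((popCounts cs true).1 + 1, (popCounts cs true).2) := by
            simp [popCounts]
          rw [hcc] at h ⊢
          cases xs with
          | nil => simp at h
          | cons y ys =>
            simp only [List.foldl_cons, solveStepA, Char.reduceEq, reduceIte,
              PySem.List.pop?_zero_cons]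
            rw [show ((some ((y, ys) : String × List String)).map Prod.snd).getD (y :: ys) = ys by rfl]
            rw [ih true ys (by simp at h ⊢; omega)]
            rw [Prod.mk.injEq]
            refine ⟨?_, ?_⟩
            · simp [finalLeft]
            · simp only [List.length_cons, List.drop_succ_cons]
              congr 1
              omega
      · simp only [List.foldl_cons, solveStepA, if_neg hR, if_neg hD]
        have hcc : popCounts (c :: cs) left = popCounts cs left := by
          simp [popCounts, hR, hD]
        have hf : finalLeft (c :: cs) left = finalLeft cs left := by
          simp [finalLeft, hR]
        rw [hcc] at h ⊢
        rw [hf]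
        exact ih left xs h

-- ===== VERDICT (by name: the statement is the Claim_ definition above) =====
theorem solve_spec : Claim_equal_solve := by
  intro funcs num_list _
  unfold Spec_solve solve solve_alt
  have hcount : PySem.Str.count funcs "D" = funcs.toList.count 'D' := strCount_D funcs
  set cs := funcs.toList with hcs
  set a := (popCounts cs true).1 with ha
  set b := (popCounts cs true).2 with hb
  have hsum : a + b = cs.count 'D' := popCounts_sum cs true
  rw [foldB_eq]
  by_cases hguard : num_list.length < PySem.Str.count funcs "D"
  · -- error branch on both sides
    rw [if_pos hguard]
    rw [hcount] at hguard
    have : ((num_list.length : Int) - (b : Int)) < ((0 : Int) + (a : Int)) := by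
      omega
    simp only [← ha, ← hb, if_pos this]
  · rw [if_neg hguard]
    rw [hcount] at hguard
    have hle : a + b ≤ num_list.length := by omega
    have hno : ¬ ((num_list.length : Int) - (b : Int)) < ((0 : Int) + (a : Int)) := by
      omega
    simp only [← ha, ← hb, if_neg hno]
    rw [foldA_eq cs true num_list hle]
    have hslice : PySem.List.slice num_list (some ((0 : Int) + (a : Int)))
        (some ((num_list.length : Int) - (b : Int))) =
        (num_list.drop a).take (num_list.length - a - b) := by
      have h1 : ((0 : Int) + (a : Int)) = ((a : Nat) : Int) := by ring
      have h2 : ((num_list.length : Int) - (b : Int)) = (((num_list.length - b : Nat)) : Int) := by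
        omega
      rw [h1, h2, PySem.List.slice_natCast]
      congr 1
      omega
    rw [hslice]
    set body := (num_list.drop a).take (num_list.length - a - b) with hbody
    by_cases hlen : body.length > 0
    · rw [if_pos hlen]
      cases hfl : finalLeft cs true <;> simp
    · rw [if_neg hlen]
      have hnil : body = [] := by
        have : body.length = 0 := by omega
        exact List.eq_nil_of_length_eq_zero this
      rw [hnil]
      cases hfl : finalLeft cs true <;> simp <;> decide
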